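-- pv_equiv track=rewrite | github.com/Red1an/PythonScripts | Graphs/Graph3/Graph3.py | matrix_heavy_vertices
-- ===== SOURCE A (Python) =====
-- def matrix_heavy_vertices(matrix, vertices, threshold):
--     result = []
--     n = len(matrix)
--     for i in range(n):
--         total = sum(matrix[i]) + sum(matrix[r][i] for r in range(n))
--         if total > threshold:
--             result.append((vertices[i], total))
--     return result
-- ===== SOURCE B (Python) =====
-- def matrix_heavy_vertices(matrix, vertices, threshold):
--     n = len(matrix)
--     totals = [0] * n
--     for r, row in enumerate(matrix):
--         for c, x in enumerate(row):
--             totals[r] += x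
--             if c < n:
--                 totals[c] += x
--     return [(vertices[i], t) for i, t in enumerate(totals) if t > threshold]
-- ===== Notes on version B (the rewrite author's own statement) =====
-- stated objective: alternative
-- what changed: B is a scatter: one pass over the matrix cells adds each entry matrix[r][c] to totals[r] and totals[c], so no row or column is ever gathered; A gathers, re-scanning the whole column for every vertex. Pre_ admits exactly the inputs on which A returns (rows at least n long, every heavy index has a vertex name).
import Mathlib
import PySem

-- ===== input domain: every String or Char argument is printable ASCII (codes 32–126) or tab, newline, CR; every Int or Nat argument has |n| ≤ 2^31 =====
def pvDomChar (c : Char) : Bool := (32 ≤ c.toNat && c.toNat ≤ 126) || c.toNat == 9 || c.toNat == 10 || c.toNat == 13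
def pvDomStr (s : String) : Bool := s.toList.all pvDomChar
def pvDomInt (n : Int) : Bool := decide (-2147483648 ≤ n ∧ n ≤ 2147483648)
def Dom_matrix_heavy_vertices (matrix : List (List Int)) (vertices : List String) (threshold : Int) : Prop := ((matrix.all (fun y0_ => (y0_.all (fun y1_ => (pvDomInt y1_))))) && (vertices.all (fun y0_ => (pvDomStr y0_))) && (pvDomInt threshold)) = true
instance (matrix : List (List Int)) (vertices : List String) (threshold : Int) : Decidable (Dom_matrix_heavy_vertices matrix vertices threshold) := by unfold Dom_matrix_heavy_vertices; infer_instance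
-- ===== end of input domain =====

-- B scatters: one pass over the matrix cells adds each entry to its row bucket and its
-- column bucket of one totals array; A gathers a fresh row and column per vertex
-- (alternative decomposition, same asymptotic cost).

-- ===== PORT A =====
-- literal port of A: for each i in range(n), total = sum(matrix[i]) + sum(matrix[r][i] for r in range(n))
def matrix_heavy_vertices (matrix : List (List Int)) (vertices : List String) (threshold : Int) : List (String × Int) :=
  let n := matrix.length
  (List.range n).foldl (fun result i =>
    let total := (matrix.getD i []).sum +
                 ((List.range n).map (fun r => (matrix.getD r []).getD i 0)).sum
    if total > threshold then result ++ [(vertices.getD i "", total)] else result) []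

-- ===== PORT B =====
-- inner loop of Source B: for c, x in enumerate(row): totals[r] += x; if c < n: totals[c] += x
def bScatterRow (n r : Nat) : Nat → List Int → List Int → List Int
  | _, totals, [] => totals
  | c, totals, x :: rest =>
      let t1 := totals.set r (totals.getD r 0 + x)
      let t2 := if c < n then t1.set c (t1.getD c 0 + x) else t1
      bScatterRow n r (c + 1) t2 rest

-- outer loop of Source B: for r, row in enumerate(matrix)
def bScatter (n : Nat) : Nat → List Int → List (List Int) → List Int
  | _, totals, [] => totals
  | r, totals, row :: rest => bScatter n (r + 1) (bScatterRow n r 0 totals row) rest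

-- final comprehension of Source B: [(vertices[i], t) for i, t in enumerate(totals) if t > threshold]
def bEmit (vertices : List String) (threshold : Int) : Nat → List Int → List (String × Int)
  | _, [] => []
  | i, t :: rest =>
      (if t > threshold then [(vertices.getD i "", t)] else []) ++ bEmit vertices threshold (i + 1) rest

def matrix_heavy_vertices_alt (matrix : List (List Int)) (vertices : List String) (threshold : Int) : List (String × Int) :=
  let n := matrix.length
  bEmit vertices threshold 0 (bScatter n 0 (List.replicate n 0) matrix)

-- ===== PRECONDITION & SPEC =====
-- Pre_ is exactly the set of inputs on which the Python A returns normally: every row must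
-- have at least n = len(matrix) entries (else matrix[r][i] raises IndexError), and every
-- heavy index i (row-i sum plus column-i sum exceeding the threshold) must have a vertex
-- name (else vertices[i] raises IndexError). No input on which A returns is excluded.
def Pre_matrix_heavy_vertices (matrix : List (List Int)) (vertices : List String) (threshold : Int) : Prop :=
  (∀ row ∈ matrix, matrix.length ≤ row.length) ∧
  (∀ i < matrix.length,
    (matrix.getD i []).sum + (matrix.map (fun row => row.getD i 0)).sum > threshold →
      i < vertices.length)
instance (matrix : List (List Int)) (vertices : List String) (threshold : Int) : Decidable (Pre_matrix_heavy_vertices matrix vertices threshold) := by unfold Pre_matrix_heavy_vertices; infer_instance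
def pvWitness_matrix_heavy_vertices : List (List Int) × List String × Int := ([[1, 2], [3, 4]], ["a", "b"], 5)

def Spec_matrix_heavy_vertices (matrix : List (List Int)) (vertices : List String) (threshold : Int) (out : List (String × Int)) : Prop := out = matrix_heavy_vertices_alt matrix vertices threshold
instance (matrix : List (List Int)) (vertices : List String) (threshold : Int) (out : List (String × Int)) : Decidable (Spec_matrix_heavy_vertices matrix vertices threshold out) := by unfold Spec_matrix_heavy_vertices; infer_instance

-- ===== CLAIM (what is proved, stated in full; the proofs are below) =====
def Claim_equal_matrix_heavy_vertices : Prop := ∀ (matrix : List (List Int)) (vertices : List String) (threshold : Int), Dom_matrix_heavy_vertices matrix vertices threshold → Pre_matrix_heavy_vertices matrix vertices threshold → Spec_matrix_heavy_vertices matrix vertices threshold (matrix_heavy_vertices matrix vertices threshold)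

-- ===== LEMMAS AND PROOFS =====

-- the inner scatter preserves the length of totals
lemma bScatterRow_len (n r : Nat) : ∀ (row : List Int) (c : Nat) (totals : List Int),
    (bScatterRow n r c totals row).length = totals.length := by
  intro row
  induction row with
  | nil => intro c totals; simp [bScatterRow]
  | cons x rest ih =>
    intro c totals
    simp only [bScatterRow]
    rw [ih]
    split <;> simp

-- entry j after scattering one row starting at column index c
lemma bScatterRow_getD (n r : Nat) (hr : r < n) : ∀ (row : List Int) (c : Nat) (totals : List Int),
    totals.length = n → ∀ j < n,
    (bScatterRow n r c totals row).getD j 0 =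
      totals.getD j 0 + (if j = r then row.sum else 0) +
        (if c ≤ j then row.getD (j - c) 0 else 0) := by
  intro row
  induction row with
  | nil => intro c totals _ j _; simp [bScatterRow]
  | cons x rest ih =>
    intro c totals hlen j hj
    simp only [bScatterRow]
    set t1 := totals.set r (totals.getD r 0 + x) with ht1
    set t2 := if c < n then t1.set c (t1.getD c 0 + x) else t1 with ht2
    have ht1len : t1.length = n := by simp [ht1, hlen]
    have ht2len : t2.length = n := by rw [ht2]; split <;> simp [ht1len]
    have ht1get : ∀ k, k < n → t1.getD k 0 = totals.getD k 0 + (if k = r then x else 0) := by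
      intro k hk
      by_cases hkr : k = r
      · rw [ht1, hkr, List.getD_eq_getElem?_getD, List.getElem?_set_self (by omega)]
        simp
      · rw [ht1, List.getD_eq_getElem?_getD, List.getElem?_set_ne (by omega),
            ← List.getD_eq_getElem?_getD, if_neg hkr, add_zero]
    have ht2get : ∀ k, k < n → t2.getD k 0 =
        totals.getD k 0 + (if k = r then x else 0) + (if k = c then x else 0) := by
      intro k hk
      by_cases hkc : k = c
      · have hc : c < n := hkc ▸ hk
        rw [ht2, if_pos hc, hkc, List.getD_eq_getElem?_getD, List.getElem?_set_self (by omega),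
            Option.getD_some, ht1get c hc]
        simp
      · rw [ht2]
        split
        · rw [List.getD_eq_getElem?_getD, List.getElem?_set_ne (by omega),
              ← List.getD_eq_getElem?_getD, ht1get k hk]
          simp
        · rw [ht1get k hk]
          simp
    rw [ih (c + 1) t2 ht2len j hj, ht2get j hj]
    by_cases hjc : j = c
    · subst hjc
      simp [(by omega : ¬ j + 1 ≤ j), List.sum_cons]
      split_ifs <;> first | (exfalso; omega) | ring
    · by_cases hcj : c ≤ j
      · simp [hjc, hcj, (by omega : c + 1 ≤ j), (by omega : j - c = (j - (c + 1)) + 1),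
              List.sum_cons]
        split_ifs <;> first | (exfalso; omega) | ring
      · simp [hjc, hcj, (by omega : ¬ c + 1 ≤ j), List.sum_cons]
        split_ifs <;> first | (exfalso; omega) | ring

-- the outer scatter preserves the length of totals
lemma bScatter_len (n : Nat) : ∀ (rows : List (List Int)) (r : Nat) (totals : List Int),
    (bScatter n r totals rows).length = totals.length := by
  intro rows
  induction rows with
  | nil => intro r totals; simp [bScatter]
  | cons row rest ih =>
    intro r totals
    simp only [bScatter]
    rw [ih, bScatterRow_len]

-- entry j after scattering a block of rows starting at row index r
lemma bScatter_getD (n : Nat) : ∀ (rows : List (List Int)) (r : Nat) (totals : List Int),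
    totals.length = n → r + rows.length ≤ n → ∀ j < n,
    (bScatter n r totals rows).getD j 0 =
      totals.getD j 0 +
        (if r ≤ j ∧ j < r + rows.length then (rows.getD (j - r) []).sum else 0) +
        (rows.map (fun row => row.getD j 0)).sum := by
  intro rows
  induction rows with
  | nil => intro r totals _ _ j _; simp [bScatter]
  | cons row rest ih =>
    intro r totals hlen hle j hj
    simp only [bScatter]
    have hr : r < n := by simp at hle; omega
    have hlen' : (bScatterRow n r 0 totals row).length = n := by rw [bScatterRow_len]; exact hlen
    have hle' : (r + 1) + rest.length ≤ n := by simp at hle ⊢; omega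
    rw [ih (r + 1) _ hlen' hle' j hj,
        bScatterRow_getD n r hr row 0 totals hlen j hj]
    simp only [Nat.zero_le, if_pos, List.map_cons, List.sum_cons, List.length_cons]
    by_cases hjr : j = r
    · subst hjr
      have h1 : j ≤ j ∧ j < j + (rest.length + 1) := by omega
      have h2 : ¬ j + 1 ≤ j := by omega
      have h3 : ¬ (j + 1 ≤ j ∧ j < j + 1 + rest.length) := by omega
      simp [h1, h2, h3, Nat.sub_self]
      ring
    · by_cases hrj : r + 1 ≤ j
      · by_cases hup : j < r + 1 + rest.length
        · have h1 : r ≤ j ∧ j < r + (rest.length + 1) := by omega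
          have h2 : j - r = (j - (r + 1)) + 1 := by omega
          simp [h1, hrj, hup, h2, hjr]
          ring
        · have h1 : ¬ (r ≤ j ∧ j < r + (rest.length + 1)) := by omega
          simp [h1, hjr]
          split_ifs <;> first | (exfalso; omega) | ring
      · have h1 : ¬ (r ≤ j ∧ j < r + (rest.length + 1)) := by omega
        simp [h1, hjr]
        split_ifs <;> first | (exfalso; omega) | ring

-- mapping getD over range matrix.length recovers the rows themselves
lemma map_getD_range (matrix : List (List Int)) (f : List Int → Int) :
    (List.range matrix.length).map (fun r => f (matrix.getD r [])) = matrix.map f := by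
  apply List.ext_getElem
  · simp
  · intro i h1 h2
    simp [List.getD_eq_getElem?_getD, (by simpa using h1 : i < matrix.length)]

-- the totals array B builds holds exactly A's per-vertex totals
lemma totals_getD (matrix : List (List Int)) (j : Nat) (hj : j < matrix.length) :
    (bScatter matrix.length 0 (List.replicate matrix.length 0) matrix).getD j 0 =
      (matrix.getD j []).sum +
        ((List.range matrix.length).map (fun r => (matrix.getD r []).getD j 0)).sum := by
  rw [bScatter_getD matrix.length matrix 0 (List.replicate matrix.length 0) (by simp)
        (by simp) j hj,
      map_getD_range matrix (fun row => row.getD j 0)]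
  simp [hj]

-- B's front-to-back emit equals A's appending fold over the indices
lemma emit_eq_foldl (vertices : List String) (threshold : Int) :
    ∀ (ts : List Int) (i : Nat) (acc : List (String × Int)),
    (List.range ts.length).foldl (fun res k =>
        if ts.getD k 0 > threshold then res ++ [(vertices.getD (i + k) "", ts.getD k 0)]
        else res) acc
      = acc ++ bEmit vertices threshold i ts := by
  intro ts
  induction ts with
  | nil => intro i acc; simp [bEmit]
  | cons t rest ih =>
    intro i acc
    rw [List.length_cons, List.range_succ_eq_map, List.foldl_cons, List.foldl_map]
    have hbody : ∀ (res : List (String × Int)) (k : Nat),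
        (if (t :: rest).getD (k + 1) 0 > threshold
         then res ++ [(vertices.getD (i + (k + 1)) "", (t :: rest).getD (k + 1) 0)] else res)
        = (if rest.getD k 0 > threshold
           then res ++ [(vertices.getD ((i + 1) + k) "", rest.getD k 0)] else res) := by
      intro res k
      have : i + (k + 1) = (i + 1) + k := by omega
      simp [this]
    calc (List.range rest.length).foldl (fun res k =>
            if (t :: rest).getD (k + 1) 0 > threshold
            then res ++ [(vertices.getD (i + (k + 1)) "", (t :: rest).getD (k + 1) 0)] else res)
            (if (t :: rest).getD 0 0 > threshold
             then acc ++ [(vertices.getD (i + 0) "", (t :: rest).getD 0 0)] else acc)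
        = (List.range rest.length).foldl (fun res k =>
            if rest.getD k 0 > threshold
            then res ++ [(vertices.getD ((i + 1) + k) "", rest.getD k 0)] else res)
            (if t > threshold then acc ++ [(vertices.getD i "", t)] else acc) := by
            apply PySem.List.foldl_congr_mem
            intro res k _
            exact hbody res k
      _ = acc ++ bEmit vertices threshold i (t :: rest) := by
            rw [ih (i + 1)]
            simp only [bEmit]
            split <;> simp

-- ===== VERDICT (by name: the statement is the Claim_ definition above) =====
theorem matrix_heavy_vertices_spec : Claim_equal_matrix_heavy_vertices := by
  intro matrix vertices threshold _ _
  unfold Spec_matrix_heavy_vertices matrix_heavy_vertices matrix_heavy_vertices_alt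
  simp only []
  have htslen : (bScatter matrix.length 0 (List.replicate matrix.length 0) matrix).length
      = matrix.length := by
    rw [bScatter_len]; simp
  have hstep : (List.range matrix.length).foldl (fun result i =>
      let total := (matrix.getD i []).sum +
                   ((List.range matrix.length).map (fun r => (matrix.getD r []).getD i 0)).sum
      if total > threshold then result ++ [(vertices.getD i "", total)] else result) []
    = (List.range (bScatter matrix.length 0 (List.replicate matrix.length 0) matrix).length).foldl
        (fun res k =>
          if (bScatter matrix.length 0 (List.replicate matrix.length 0) matrix).getD k 0 > threshold
          then res ++ [(vertices.getD (0 + k) "",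
                 (bScatter matrix.length 0 (List.replicate matrix.length 0) matrix).getD k 0)]
          else res) [] := by
    rw [htslen]
    apply PySem.List.foldl_congr_mem
    intro res k hk
    have hk' : k < matrix.length := List.mem_range.mp hk
    rw [totals_getD matrix k hk']
    simp
  rw [hstep, emit_eq_foldl vertices threshold _ 0 []]
  simp
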